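-- pv_equiv track=rewrite | github.com/smie8/tira2022 | week14/newwall.py | count
-- ===== SOURCE A (Python) =====
-- def count(r):
--     # Create a 2D array to store the minimum number of changes required for each cell
--     dp = [[0 for _ in range(len(r[0]))] for _ in range(len(r))]
--     # Set the value of the top left cell to 0
--     dp[0][0] = 0
--     # Iterate through the rows
--     for i in range(1, len(r)):
--         # Check if the current cell is a floor tile
--         if r[i][0] == '.':
--             # Set the value of the cell to the value of the cell above it
--             dp[i][0] = dp[i-1][0]
--         else:
--             # Set the value of the cell to the value of the cell above it + 1
--             dp[i][0] = dp[i-1][0] + 1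
--     # Iterate through the columns
--     for j in range(1, len(r[0])):
--         # Check if the current cell is a floor tile
--         if r[0][j] == '.':
--             # Set the value of the cell to the value of the cell to the left of it
--             dp[0][j] = dp[0][j-1]
--         else:
--             # Set the value of the cell to the value of the cell to the left of it + 1
--             dp[0][j] = dp[0][j-1] + 1
--     # Iterate through the rows
--     for i in range(1, len(r)):
--         # Iterate through the columns
--         for j in range(1, len(r[0])):
--             # Check if the current cell is a floor tile
--             if r[i][j] == '.':
--                 # Set the value of the cell to the minimum of the values of the cell above it and the cell to the left of it
--                 dp[i][j] = min(dp[i-1][j], dp[i][j-1])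
--             else:
--                 # Set the value of the cell to the minimum of the values of the cell above it and the cell to the left of it + 1
--                 dp[i][j] = min(dp[i-1][j], dp[i][j-1]) + 1
--     # Return the value of the bottom right cell
--     return dp[-1][-1]
-- ===== SOURCE B (Python) =====
-- def count(r):
--     # top-down memoized evaluation of f(i,j) = min '#'-tiles to reach (i,j),
--     # driven by an explicit stack (so no recursion-depth limit applies)
--     h, w = len(r), len(r[0])
--     memo = {}
--     stack = [(h - 1, w - 1)]
--     while stack:
--         i, j = stack[-1]
--         if (i, j) in memo:
--             stack.pop()
--         elif i == 0 and j == 0: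
--             memo[(i, j)] = 0
--             stack.pop()
--         else:
--             deps = [d for d in ((i - 1, j), (i, j - 1)) if d[0] >= 0 and d[1] >= 0]
--             todo = [d for d in deps if d not in memo]
--             if todo:
--                 stack.extend(todo)
--             else:
--                 memo[(i, j)] = min(memo[d] for d in deps) + (r[i][j] != '.')
--                 stack.pop()
--     return memo[(h - 1, w - 1)]
-- ===== Notes on version B (the rewrite author's own statement) =====
-- stated objective: alternative
-- what changed: B replaces A's bottom-up forward fill of a preallocated 2D table (three explicit index loops) with top-down memoized evaluation of f(i,j) driven by an explicit stack from the target cell: each cell is resolved on demand from its predecessors and cached in a dict, with no table, no separate first-row/first-column loops and no index arithmetic over a 2D array.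
import Mathlib
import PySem

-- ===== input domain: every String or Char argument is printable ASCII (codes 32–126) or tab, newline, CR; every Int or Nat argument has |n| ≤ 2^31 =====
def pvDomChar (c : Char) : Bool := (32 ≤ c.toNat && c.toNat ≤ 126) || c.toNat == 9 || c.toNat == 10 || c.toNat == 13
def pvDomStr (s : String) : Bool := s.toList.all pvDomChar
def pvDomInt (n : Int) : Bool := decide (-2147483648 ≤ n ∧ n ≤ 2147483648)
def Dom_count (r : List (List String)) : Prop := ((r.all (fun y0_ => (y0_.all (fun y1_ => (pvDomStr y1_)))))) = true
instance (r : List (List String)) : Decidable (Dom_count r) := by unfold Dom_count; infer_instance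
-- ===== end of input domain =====

-- B evaluates the same quantity top-down with an explicit stack and a memo dict instead of A's
-- bottom-up forward fill of a 2D table (equal return values on Pre_; neither side mutates r).

-- ===== PORT A =====
-- helpers: Python reads dp[i][j] / r[i][j] (pyGet?, default irrelevant inside Pre_) and writes dp[i][j] = v (List.set)
def pvGetRow (dp : List (List Int)) (i : Int) : List Int := (PySem.List.pyGet? dp i).getD []
def pvGetCell (dp : List (List Int)) (i j : Int) : Int := (PySem.List.pyGet? (pvGetRow dp i) j).getD 0
def pvGetStr (r : List (List String)) (i j : Int) : String := (PySem.List.pyGet? ((PySem.List.pyGet? r i).getD []) j).getD ""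
def pvSetCell (dp : List (List Int)) (i j : Nat) (v : Int) : List (List Int) := dp.set i ((dp.getD i []).set j v)

def count (r : List (List String)) : Int :=
  let h : Int := r.length
  let w : Int := (r.headD []).length
  -- dp = [[0 for _ in range(len(r[0]))] for _ in range(len(r))]
  let dp : List (List Int) := (PySem.List.pyRange 0 h 1).map (fun _ => (PySem.List.pyRange 0 w 1).map (fun _ => (0 : Int)))
  -- dp[0][0] = 0
  let dp := pvSetCell dp 0 0 0
  -- for i in range(1, len(r)): first-column loop
  let dp := (PySem.List.pyRange 1 h 1).foldl (fun dp i =>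
      pvSetCell dp i.toNat 0
        (if pvGetStr r i 0 = "." then pvGetCell dp (i-1) 0 else pvGetCell dp (i-1) 0 + 1)) dp
  -- for j in range(1, len(r[0])): first-row loop
  let dp := (PySem.List.pyRange 1 w 1).foldl (fun dp j =>
      pvSetCell dp 0 j.toNat
        (if pvGetStr r 0 j = "." then pvGetCell dp 0 (j-1) else pvGetCell dp 0 (j-1) + 1)) dp
  -- nested loops over the interior
  let dp := (PySem.List.pyRange 1 h 1).foldl (fun dp i =>
      (PySem.List.pyRange 1 w 1).foldl (fun dp j =>
        pvSetCell dp i.toNat j.toNat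
          (if pvGetStr r i j = "."
           then min (pvGetCell dp (i-1) j) (pvGetCell dp i (j-1))
           else min (pvGetCell dp (i-1) j) (pvGetCell dp i (j-1)) + 1)) dp) dp
  -- return dp[-1][-1]
  pvGetCell dp (-1) (-1)

-- ===== PORT B =====
-- Source B's while-loop over (stack, memo); the Python list used as a stack (top = end) is the Lean
-- list with top = head (append/pop at the end ↔ cons/head), so stack.extend(todo) is
-- todo.reverse ++ stack.  The Nat fuel is a totality guard only (the while-loop has no bound);
-- the proofs show it is never exhausted.  min(memo[d] for d in deps) and memo[d] are ported with
-- .getD 0 defaults that never fire in the branch taken (deps ≠ [] and all deps are cached there).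
def pvRun (r : List (List String)) : Nat → List (Int × Int) → PySem.Dict (Int × Int) Int → PySem.Dict (Int × Int) Int
  | 0, _, memo => memo
  | _ + 1, [], memo => memo
  | fuel + 1, (i, j) :: rest, memo =>
      if memo.contains (i, j) then
        pvRun r fuel rest memo
      else if i = 0 ∧ j = 0 then
        pvRun r fuel rest (memo.insert (i, j) 0)
      else
        let deps := [(i - 1, j), (i, j - 1)].filter (fun d => decide (0 ≤ d.1 ∧ 0 ≤ d.2))
        let todo := deps.filter (fun d => !(memo.contains d))
        if todo ≠ [] then
          pvRun r fuel (todo.reverse ++ (i, j) :: rest) memo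
        else
          pvRun r fuel rest (memo.insert (i, j)
            (((deps.map (fun d => memo.getD d 0)).min?).getD 0
              + (if pvGetStr r i j ≠ "." then 1 else 0)))

def count_alt (r : List (List String)) : Int :=
  let h : Int := r.length
  let w : Int := (r.headD []).length
  let memo := pvRun r (3 ^ (r.length + (r.headD []).length)) [(h - 1, w - 1)] PySem.Dict.empty
  -- return memo[(h-1, w-1)] (present whenever the loop finished normally; proved under Pre_)
  (memo.get? (h - 1, w - 1)).getD 0

-- ===== PRECONDITION & SPEC =====
-- Pre_ excludes exactly the inputs on which A raises IndexError: an empty grid, an empty first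
-- row, or a later row shorter than the first (A indexes r[i][j] for every j < len(r[0])).
def Pre_count (r : List (List String)) : Prop :=
  r ≠ [] ∧ (r.headD []) ≠ [] ∧ ∀ row ∈ r, (r.headD []).length ≤ row.length
instance (r : List (List String)) : Decidable (Pre_count r) := by unfold Pre_count; infer_instance

def pvWitness_count : List (List String) := [[".", "#", "."], ["#", ".", "."], [".", ".", "#"]]

def Spec_count (r : List (List String)) (out : Int) : Prop := out = count_alt r
instance (r : List (List String)) (out : Int) : Decidable (Spec_count r out) := by unfold Spec_count; infer_instance

-- ===== CLAIM (what is proved, stated in full; the proofs are below) =====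
def Claim_equal_count : Prop := ∀ (r : List (List String)), Dom_count r → Pre_count r → Spec_count r (count r)

-- ===== LEMMAS AND PROOFS =====

-- cost of one tile; the if-forms the programs use
def pcost (s : String) : Int := if s = "." then 0 else 1

theorem if_eq_add_pcost (s : String) (x : Int) :
    (if s = "." then x else x + 1) = x + pcost s := by
  unfold pcost; split_ifs <;> simp

theorem if_ne_eq_add_pcost (s : String) (x : Int) :
    (if s ≠ "." then x + 1 else x) = x + pcost s := by
  unfold pcost; split_ifs <;> simp_all

theorem if_ne_eq_pcost (s : String) :
    (if s ≠ "." then (1:Int) else 0) = pcost s := by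
  unfold pcost; split_ifs <;> simp_all

-- rolling-row characterisation of A's table (proof-side only): first row as a prefix scan,
-- each later row produced left to right from the previous one
def pvFirstCosts : List String → Int → List Int
  | [], _ => []
  | s :: rest, a =>
      let a' := if s ≠ "." then a + 1 else a
      a' :: pvFirstCosts rest a'

def pvRowCells : List (String × Int) → Option Int → List Int
  | [], _ => []
  | (s, up) :: rest, left =>
      let v := (match left with | none => up | some l => min up l) + (if s ≠ "." then 1 else 0)
      v :: pvRowCells rest (some v)

def pvRoll (r : List (List String)) : Int :=
  let cur := 0 :: pvFirstCosts ((r.headD []).drop 1) 0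
  let fin := (r.drop 1).foldl (fun cur row => pvRowCells (row.zip cur) none) cur
  (PySem.List.pyGet? fin (-1)).getD 0

-- generic left-to-right fill of a suffix of positions, value at each position a function of
-- the position and the value just to its left
def genFill {α : Type} (f : Nat → α → α) : Nat → Nat → α → List α
  | _, 0, _ => []
  | a, t+1, l => f a l :: genFill f (a+1) t (f a l)

theorem foldl_fill {α : Type} (step : List α → Int → List α) (f : Nat → α → α) (z : α)
    (hstep : ∀ (d : List α) (l : α) (t : Nat),
      step (d ++ l :: z :: List.replicate t z) ((d.length : Int) + 1)
        = d ++ l :: f (d.length + 1) l :: List.replicate t z) :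
    ∀ (t : Nat) (d : List α) (l : α),
      (PySem.List.pyRange ((d.length : Int) + 1) ((d.length : Int) + 1 + t) 1).foldl step
          (d ++ l :: List.replicate t z)
        = d ++ l :: genFill f (d.length + 1) t l := by
  intro t
  induction t with
  | zero =>
      intro d l
      rw [PySem.List.pyRange_one_eq_nil (by push_cast; omega)]
      simp [genFill]
  | succ t ih =>
      intro d l
      rw [PySem.List.pyRange_one_cons (by push_cast; omega)]
      simp only [List.foldl_cons, List.replicate_succ]
      rw [hstep d l t]
      have key := ih (d ++ [l]) (f (d.length + 1) l)
      simp only [List.length_append, List.length_cons, List.length_nil, List.append_assoc,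
        List.cons_append, List.nil_append] at key ⊢
      norm_num at key ⊢
      ring_nf at key ⊢
      rw [key]
      rw [show (1 + t) = t + 1 by omega]
      simp only [genFill]
      rw [show (1 + d.length + 1) = 2 + d.length by omega]

-- a fold whose every step rewrites only the head row
theorem foldl_set_head {α : Type} (step : List α → Int → List α) (g : α → Int → α)
    (js : List Int) (hstep : ∀ (x : α) (xs : List α) (j : Int), j ∈ js → step (x :: xs) j = g x j :: xs) :
    ∀ (x : α) (xs : List α), js.foldl step (x :: xs) = js.foldl g x :: xs := by
  induction js with
  | nil => intro x xs; rfl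
  | cons j js ih =>
      intro x xs
      simp only [List.foldl_cons]
      rw [hstep x xs j (by simp)]
      exact ih (fun x xs j hj => hstep x xs j (by simp [hj])) _ _

-- a fold whose every step rewrites only row n, reading row n-1 (which it never touches)
theorem foldl_set_row {α : Type} [Inhabited α] (step : List α → Int → List α)
    (g : α → α → Int → α) (js : List Int) (d : List α)
    (hstep : ∀ (dp : List α) (j : Int), j ∈ js →
        step dp j = dp.set (d.length + 1)
          (g ((PySem.List.pyGet? dp ((d.length : Int) + 1 - 1)).getD default)
            (dp.getD (d.length + 1) default) j)) :
    ∀ (prev cur : α) (tl : List α),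
      js.foldl step (d ++ prev :: cur :: tl) = d ++ prev :: js.foldl (g prev) cur :: tl := by
  induction js with
  | nil => intro prev cur tl; rfl
  | cons j js ih =>
      intro prev cur tl
      simp only [List.foldl_cons]
      rw [hstep _ j (by simp)]
      have h1 : ((d.length : Int) + 1 - 1) = (d.length : Int) := by ring
      rw [h1, PySem.List.pyGet?_append_length]
      simp only [Option.getD_some]
      have h2 : (d ++ prev :: cur :: tl).getD (d.length + 1) default = cur := by
        simp [List.getD]
      have h3 : (d ++ prev :: cur :: tl).set (d.length + 1) (g prev cur j) =
          d ++ prev :: g prev cur j :: tl := by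
        simp only [le_add_iff_nonneg_right, zero_le, List.set_append_right,
          add_tsub_cancel_left, List.set_cons_succ, List.set_cons_zero]
      rw [h2, h3]
      exact ih (fun dp j hj => hstep dp j (by simp [hj])) _ _ _

-- the row sequence of the rolling characterisation after the first row
def bRows : List (List String) → List Int → List (List Int)
  | [], _ => []
  | row :: rest, prev =>
      pvRowCells (row.zip prev) none :: bRows rest (pvRowCells (row.zip prev) none)

-- the column-0 fill function of A's first loop (a pending row: column cost then zeros)
def pvF1 (r : List (List String)) (w : Nat) : Nat → List Int → List Int :=
  fun i l => ((PySem.List.pyGet? l 0).getD 0 + pcost (pvGetStr r (i : Int) 0)) :: List.replicate (w-1) 0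

theorem genFill_pvF1_congr (r : List (List String)) (w : Nat) :
    ∀ (t a : Nat) (l l' : List Int),
      (PySem.List.pyGet? l 0).getD 0 = (PySem.List.pyGet? l' 0).getD 0 →
      genFill (pvF1 r w) a t l = genFill (pvF1 r w) a t l' := by
  intro t
  induction t with
  | zero => intro a l l' _; rfl
  | succ t ih =>
      intro a l l' h
      simp only [genFill, pvF1, h]

theorem pvRowCells_length : ∀ (ps : List (String × Int)) (o : Option Int),
    (pvRowCells ps o).length = ps.length := by
  intro ps
  induction ps with
  | nil => intro o; rfl
  | cons p rest ih => intro o; cases p with | mk s up => simp [pvRowCells, ih]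

-- the interior fill of one row equals the zip pass
theorem genFill_rowCells (prev : List Int) (row : List String) (w : Nat)
    (hp : prev.length = w) (hr : w ≤ row.length) :
    ∀ (t a : Nat) (l : Int), a + t = w →
      genFill (fun j l => min ((PySem.List.pyGet? prev (j : Int)).getD 0) l
          + pcost ((PySem.List.pyGet? row (j : Int)).getD "")) a t l
        = pvRowCells ((row.zip prev).drop a) (some l) := by
  have hz : (row.zip prev).length = w := by
    rw [List.length_zip, hp]; omega
  intro t
  induction t with
  | zero =>
      intro a l h
      have hnil : (row.zip prev).drop a = [] := List.drop_eq_nil_of_le (by omega)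
      simp [genFill, hnil, pvRowCells]
  | succ t ih =>
      intro a l h
      have ha : a < (row.zip prev).length := by omega
      have har : a < row.length := by omega
      have hap : a < prev.length := by omega
      have hd : (row.zip prev).drop a = (row.zip prev)[a] :: (row.zip prev).drop (a+1) :=
        List.drop_eq_getElem_cons ha
      have hel : (row.zip prev)[a] = (row[a], prev[a]) := List.getElem_zip
      have ih' := ih (a+1) (min prev[a] l + pcost row[a]) (by omega)
      rw [hd, hel]
      simp only [genFill, pvRowCells, PySem.List.pyGet?_natCast,
        List.getElem?_eq_getElem har, List.getElem?_eq_getElem hap, Option.getD_some,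
        if_ne_eq_pcost] at ih' ⊢
      rw [ih']

-- the first-row fill equals the prefix scan
theorem genFill_firstCosts (r0 : List String) :
    ∀ (t a : Nat) (l : Int), a + t = r0.length →
      genFill (fun j l => l + pcost ((PySem.List.pyGet? r0 (j : Int)).getD "")) a t l
        = pvFirstCosts (r0.drop a) l := by
  intro t
  induction t with
  | zero =>
      intro a l h
      have hnil : r0.drop a = [] := List.drop_eq_nil_of_le (by omega)
      simp [genFill, hnil, pvFirstCosts]
  | succ t ih =>
      intro a l h
      have ha : a < r0.length := by omega
      have hd : r0.drop a = r0[a] :: r0.drop (a+1) := List.drop_eq_getElem_cons ha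
      have ih' := ih (a+1) (l + pcost r0[a]) (by omega)
      rw [hd]
      simp only [genFill, pvFirstCosts, PySem.List.pyGet?_natCast,
        List.getElem?_eq_getElem ha, Option.getD_some, if_ne_eq_add_pcost] at ih' ⊢
      rw [ih']

-- last element of the accumulated row list = the rolling fold
theorem getLast_bRows : ∀ (ss : List (List String)) (prev : List Int),
    (prev :: bRows ss prev).getLast? =
      some (ss.foldl (fun cur row => pvRowCells (row.zip cur) none) prev) := by
  intro ss
  induction ss with
  | nil => intro prev; rfl
  | cons row rest ih =>
      intro prev
      simp only [bRows, List.foldl_cons]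
      rw [List.getLast?_cons_cons]
      exact ih _

-- A's nested interior loops, peeled one outer row at a time
theorem outer_fill (r : List (List String)) (w : Nat) (hw : 1 ≤ w)
    (hrw : ((r.headD []).length : Int) = (w : Int)) :
    ∀ (ss : List (List String)) (d : List (List Int)) (prev : List Int),
      r.drop (d.length + 1) = ss →
      prev.length = w →
      (∀ row ∈ ss, w ≤ row.length) →
      (PySem.List.pyRange ((d.length : Int) + 1) ((d.length : Int) + 1 + ss.length) 1).foldl
          (fun dp i =>
            (PySem.List.pyRange 1 ((r.headD []).length : Int) 1).foldl (fun dp j =>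
              pvSetCell dp i.toNat j.toNat
                (if pvGetStr r i j = "."
                 then min (pvGetCell dp (i-1) j) (pvGetCell dp i (j-1))
                 else min (pvGetCell dp (i-1) j) (pvGetCell dp i (j-1)) + 1)) dp)
          (d ++ prev :: genFill (pvF1 r w) (d.length + 1) ss.length prev)
        = d ++ prev :: bRows ss prev := by
  intro ss
  induction ss with
  | nil =>
      intro d prev _ _ _
      simp only [List.length_nil, Nat.cast_zero, add_zero, genFill, bRows]
      rw [show PySem.List.pyRange ((d.length : Int) + 1) ((d.length : Int) + 1) 1 = [] from
        PySem.List.pyRange_one_eq_nil le_rfl]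
      rfl
  | cons row rest ih =>
      intro d prev hdrop hp hrows
      have hw' : w ≤ row.length := hrows row (by simp)
      have hd1 : d.length + 1 < r.length := by
        have h := congrArg List.length hdrop
        simp [List.length_drop] at h
        omega
      have hget : PySem.List.pyGet? r ((d.length : Int) + 1) = some row := by
        rw [show ((d.length : Int) + 1) = ((d.length + 1 : Nat) : Int) by push_cast; ring,
          PySem.List.pyGet?_natCast, ← List.head?_drop, hdrop]
        rfl
      -- peel the first outer index d.length+1 off the range
      rw [show ((d.length : Int) + 1 + ((row :: rest).length : Int))
            = ((d.length : Int) + 1 + 1 + (rest.length : Int)) by push_cast [List.length_cons]; ring]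
      rw [show PySem.List.pyRange ((d.length : Int) + 1) ((d.length : Int) + 1 + 1 + (rest.length : Int)) 1
            = ((d.length : Int) + 1) :: PySem.List.pyRange ((d.length : Int) + 1 + 1) ((d.length : Int) + 1 + 1 + (rest.length : Int)) 1
          from PySem.List.pyRange_one_cons (by omega)]
      simp only [List.foldl_cons, List.length_cons, genFill]
      have htn : ((d.length : Int) + 1).toNat = d.length + 1 := by omega
      have hc : ∀ dp : List (List Int),
          (PySem.List.pyGet? dp ((d.length : Int) + 1)).getD [] = dp.getD (d.length + 1) [] := by
        intro dp
        rw [show ((d.length : Int) + 1) = ((d.length + 1 : Nat) : Int) by push_cast; ring,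
          PySem.List.pyGet?_natCast]
        simp [List.getD]
      have hset := foldl_set_row
        (fun dp j => pvSetCell dp ((d.length : Int) + 1).toNat j.toNat
          (if pvGetStr r ((d.length : Int) + 1) j = "." then
            min (pvGetCell dp ((d.length : Int) + 1 - 1) j) (pvGetCell dp ((d.length : Int) + 1) (j - 1))
          else min (pvGetCell dp ((d.length : Int) + 1 - 1) j) (pvGetCell dp ((d.length : Int) + 1) (j - 1)) + 1))
        (fun p c j => c.set j.toNat
          (if pvGetStr r ((d.length : Int) + 1) j = "." then
            min ((PySem.List.pyGet? p j).getD 0) ((PySem.List.pyGet? c (j - 1)).getD 0)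
          else min ((PySem.List.pyGet? p j).getD 0) ((PySem.List.pyGet? c (j - 1)).getD 0) + 1))
        (PySem.List.pyRange 1 ((r.headD []).length : Int) 1) d
        (by
          intro dp j hj
          simp only [pvSetCell, pvGetCell, pvGetRow, htn, hc]
          rfl)
      rw [hset prev (pvF1 r w (d.length + 1) prev) _]
      simp only []
      set c1 : Int := (PySem.List.pyGet? prev 0).getD 0 + pcost (pvGetStr r ((d.length : Int) + 1) 0) with hc1
      have hrow1 : pvF1 r w (d.length + 1) prev = c1 :: List.replicate (w - 1) 0 := by
        simp only [pvF1, hc1]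
        push_cast
        rfl
      rw [hrow1]
      have hfill := foldl_fill
        (fun cr j => cr.set j.toNat
          (if pvGetStr r ((d.length : Int) + 1) j = "." then
            min ((PySem.List.pyGet? prev j).getD 0) ((PySem.List.pyGet? cr (j - 1)).getD 0)
          else min ((PySem.List.pyGet? prev j).getD 0) ((PySem.List.pyGet? cr (j - 1)).getD 0) + 1))
        (fun j l => min ((PySem.List.pyGet? prev (j : Int)).getD 0) l
          + pcost ((PySem.List.pyGet? row (j : Int)).getD ""))
        0
        (by
          intro dd l t
          have e1 : ((dd.length : Int) + 1 - 1) = (dd.length : Int) := by ring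
          have e2 : ((dd.length : Int) + 1).toNat = dd.length + 1 := by omega
          simp only [e1, e2, PySem.List.pyGet?_append_length, Option.getD_some]
          simp only [pvGetStr, hget, Option.getD_some]
          simp only [le_add_iff_nonneg_right, zero_le, List.set_append_right,
            add_tsub_cancel_left, List.set_cons_succ, List.set_cons_zero]
          rw [if_eq_add_pcost]
          push_cast
          rfl)
        (w - 1) [] c1
      simp only [List.nil_append, List.length_nil, Nat.cast_zero, zero_add] at hfill
      rw [hrw, show ((w : Int)) = 1 + ((w - 1 : Nat) : Int) by push_cast [Nat.cast_sub hw]; ring]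
      rw [hfill]
      rw [genFill_rowCells prev row w hp hw' (w - 1) 1 c1 (by omega)]
      obtain ⟨rh, rt, hr0⟩ : ∃ x xs, row = x :: xs := by
        cases row with
        | nil => simp at hw'; omega
        | cons a b => exact ⟨a, b, rfl⟩
      obtain ⟨ph, pt, hp0⟩ : ∃ x xs, prev = x :: xs := by
        cases prev with
        | nil => simp at hp; omega
        | cons a b => exact ⟨a, b, rfl⟩
      have hhead : c1 = ph + pcost rh := by
        simp [hc1, hp0, pvGetStr, hget, hr0]
      have hnew : c1 :: pvRowCells ((row.zip prev).drop 1) (some c1) = pvRowCells (row.zip prev) none := by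
        rw [hr0, hp0]
        simp [pvRowCells, pcost, hhead]
      rw [hnew]
      rw [genFill_pvF1_congr r w rest.length (d.length + 1 + 1) (c1 :: List.replicate (w - 1) 0)
        (pvRowCells (row.zip prev) none)
        (by rw [← hnew]; simp)]
      have hd2 : List.drop (d.length + 1 + 1) r = rest := by
        have h := congrArg List.tail hdrop
        rw [List.tail_drop] at h
        exact h
      have hlen' : (pvRowCells (row.zip prev) none).length = w := by
        rw [pvRowCells_length, List.length_zip, hp, min_eq_right hw']
      have hih := ih (d ++ [prev]) (pvRowCells (row.zip prev) none)
        (by simpa using hd2) hlen' (fun rr hm => hrows rr (by simp [hm]))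
      rw [hrw, show ((w : Int)) = 1 + ((w - 1 : Nat) : Int) by push_cast [Nat.cast_sub hw]; ring] at hih
      simp only [List.length_append, List.length_cons, List.length_nil, List.append_assoc,
        List.cons_append, List.nil_append] at hih
      push_cast at hih
      rw [hih]
      simp [bRows]

-- [[0]*w]*h built by A's comprehension
theorem map_const_pyRange {α : Type} (n : Nat) (x : α) :
    (PySem.List.pyRange 0 (n : Int) 1).map (fun _ => x) = List.replicate n x := by
  rw [PySem.List.pyRange_one]
  simp [List.map_map, Function.comp_def]

theorem pvFirstCosts_length : ∀ (ss : List String) (a : Int),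
    (pvFirstCosts ss a).length = ss.length := by
  intro ss
  induction ss with
  | nil => intro a; rfl
  | cons s rest ih => intro a; simp [pvFirstCosts, ih]

-- A's port equals the rolling-row characterisation
theorem count_eq_roll (r : List (List String)) (hpre : Pre_count r) : count r = pvRoll r := by
  obtain ⟨hne, hne0, hlen⟩ := hpre
  cases r with
  | nil => exact absurd rfl hne
  | cons r0 rs =>
  have hw : 1 ≤ r0.length := by
    cases r0 with
    | nil => simp at hne0
    | cons a b => simp
  simp only [count, pvRoll, List.headD]
  have hzr : ∀ v : Int, (List.replicate r0.length (0:Int)).set 0 v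
      = v :: List.replicate (r0.length - 1) 0 := by
    intro v
    conv_lhs => rw [show r0.length = (r0.length - 1) + 1 by omega, List.replicate_succ]
    rfl
  have hinit : (List.map (fun _ => List.map (fun _ => (0:Int)) (PySem.List.pyRange 0 (r0.length : Int) 1))
        (PySem.List.pyRange 0 (((r0 :: rs).length : Int)) 1))
      = List.replicate (r0 :: rs).length (List.replicate r0.length 0) := by
    rw [map_const_pyRange, map_const_pyRange]
  rw [hinit]
  have hset0 : pvSetCell (List.replicate (r0 :: rs).length (List.replicate r0.length (0:Int))) 0 0 0
      = List.replicate (r0 :: rs).length (List.replicate r0.length 0) := by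
    simp only [List.length_cons, List.replicate_succ, pvSetCell, List.set_cons_zero, List.getD]
    simp [hzr 0]
    conv_rhs => rw [show r0.length = (r0.length - 1) + 1 by omega, List.replicate_succ]
  rw [hset0]
  have h1 := foldl_fill
    (fun dp i => pvSetCell dp i.toNat 0
      (if pvGetStr (r0 :: rs) i 0 = "." then pvGetCell dp (i - 1) 0 else pvGetCell dp (i - 1) 0 + 1))
    (pvF1 (r0 :: rs) r0.length)
    (List.replicate r0.length (0:Int))
    (by
      intro dd l t
      have e1 : ((dd.length : Int) + 1 - 1) = (dd.length : Int) := by ring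
      have e2 : ((dd.length : Int) + 1).toNat = dd.length + 1 := by omega
      simp only [pvSetCell, pvGetCell, pvGetRow, e1, e2, PySem.List.pyGet?_append_length,
        Option.getD_some]
      rw [if_eq_add_pcost]
      have e3 : (dd ++ l :: List.replicate r0.length (0:Int) :: List.replicate t (List.replicate r0.length 0)).getD (dd.length + 1) []
          = List.replicate r0.length 0 := by
        simp [List.getD]
      rw [e3, hzr]
      simp only [le_add_iff_nonneg_right, zero_le, List.set_append_right,
        add_tsub_cancel_left, List.set_cons_succ, List.set_cons_zero]
      simp only [pvF1]
      push_cast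
      rfl)
    rs.length [] (List.replicate r0.length 0)
  simp only [List.nil_append, List.length_nil, Nat.cast_zero, zero_add] at h1
  rw [show (((r0 :: rs).length : Int)) = 1 + (rs.length : Int) by
        push_cast [List.length_cons]; ring,
      show (List.replicate (r0 :: rs).length (List.replicate r0.length (0:Int)))
          = List.replicate r0.length 0 :: List.replicate rs.length (List.replicate r0.length 0) by
        simp [List.replicate_succ]]
  rw [h1]
  have hzr0 : List.replicate r0.length (0:Int) = 0 :: List.replicate (r0.length - 1) 0 := by
    conv_lhs => rw [show r0.length = (r0.length - 1) + 1 by omega, List.replicate_succ]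
  have h2h := foldl_set_head
    (fun dp j => pvSetCell dp 0 j.toNat
      (if pvGetStr (r0 :: rs) 0 j = "." then pvGetCell dp 0 (j - 1) else pvGetCell dp 0 (j - 1) + 1))
    (fun x j => x.set j.toNat
      (if pvGetStr (r0 :: rs) 0 j = "." then (PySem.List.pyGet? x (j - 1)).getD 0
       else (PySem.List.pyGet? x (j - 1)).getD 0 + 1))
    (PySem.List.pyRange 1 (r0.length : Int) 1)
    (by
      intro x xs j hj
      simp only [pvSetCell, pvGetCell, pvGetRow, PySem.List.pyGet?_zero_cons, Option.getD_some,
        List.getD_cons_zero, List.set_cons_zero])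
  rw [h2h]
  have h2 := foldl_fill
    (fun x j => x.set j.toNat
      (if pvGetStr (r0 :: rs) 0 j = "." then (PySem.List.pyGet? x (j - 1)).getD 0
       else (PySem.List.pyGet? x (j - 1)).getD 0 + 1))
    (fun j l => l + pcost ((PySem.List.pyGet? r0 (j : Int)).getD ""))
    0
    (by
      intro dd l t
      have e1 : ((dd.length : Int) + 1 - 1) = (dd.length : Int) := by ring
      have e2 : ((dd.length : Int) + 1).toNat = dd.length + 1 := by omega
      simp only [e1, e2, PySem.List.pyGet?_append_length, Option.getD_some]
      simp only [pvGetStr, PySem.List.pyGet?_zero_cons, Option.getD_some]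
      simp only [le_add_iff_nonneg_right, zero_le, List.set_append_right,
        add_tsub_cancel_left, List.set_cons_succ, List.set_cons_zero]
      rw [if_eq_add_pcost]
      push_cast
      rfl)
    (r0.length - 1) [] 0
  simp only [List.nil_append, List.length_nil, Nat.cast_zero, zero_add] at h2
  rw [hzr0, show ((r0.length : Int)) = 1 + ((r0.length - 1 : Nat) : Int) by
    push_cast [Nat.cast_sub hw]; ring]
  rw [h2]
  rw [genFill_firstCosts r0 (r0.length - 1) 1 0 (by omega)]
  rw [genFill_pvF1_congr (r0 :: rs) r0.length rs.length 1 (0 :: List.replicate (r0.length - 1) 0)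
    (0 :: pvFirstCosts (r0.drop 1) 0) (by simp)]
  have h3 := outer_fill (r0 :: rs) r0.length hw (by simp) rs []
    (0 :: pvFirstCosts (r0.drop 1) 0) (by simp)
    (by simp [pvFirstCosts_length]; omega)
    (fun rr hm => by simpa using hlen rr (by simp [hm]))
  simp only [List.nil_append, List.length_nil, Nat.cast_zero, zero_add, List.headD] at h3
  rw [show ((r0.length : Int)) = 1 + ((r0.length - 1 : Nat) : Int) by
    push_cast [Nat.cast_sub hw]; ring] at h3
  rw [h3]
  simp only [pvGetCell, pvGetRow, PySem.List.pyGet?_neg_one, List.drop_one, List.drop]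
  rw [getLast_bRows rs (0 :: pvFirstCosts r0.tail 0)]
  simp

-- ===== the pure specification f(i,j) and the bridges to both sides =====

def pvC (r : List (List String)) (x y : Nat) : Int := pcost (pvGetStr r (x : Int) (y : Int))

def pvg (r : List (List String)) : Nat → Nat → Int
  | 0, 0 => 0
  | x+1, 0 => pvg r x 0 + pvC r (x+1) 0
  | 0, y+1 => pvg r 0 y + pvC r 0 (y+1)
  | x+1, y+1 => min (pvg r x (y+1)) (pvg r (x+1) y) + pvC r (x+1) (y+1)
  termination_by x y => x + y

theorem pvRun_nil (r : List (List String)) (m : Nat) (memo : PySem.Dict (Int × Int) Int) :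
    pvRun r m [] memo = memo := by cases m <;> rfl

theorem pvRun_succ_mem (r : List (List String)) (m : Nat) (i j : Int) (rest : List (Int × Int))
    (memo : PySem.Dict (Int × Int) Int) (h : memo.contains (i, j) = true) :
    pvRun r (m + 1) ((i, j) :: rest) memo = pvRun r m rest memo := by
  simp [pvRun, h]

theorem min2 (a b : Int) : (([a, b].min?).getD 0) = min a b := by simp [List.min?]
theorem min1 (a : Int) : (([a].min?).getD 0) = a := by simp [List.min?]

theorem deps_interior (x y : Nat) :
    ([(((x:Int)+1) - 1, ((y:Int)+1)), (((x:Int)+1), ((y:Int)+1) - 1)].filter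
      (fun d => decide (0 ≤ d.1 ∧ 0 ≤ d.2))) = [((x:Int), ((y:Int)+1)), (((x:Int)+1), (y:Int))] := by
  have h1 : ((x:Int)+1) - 1 = (x:Int) := by ring
  have h2 : ((y:Int)+1) - 1 = (y:Int) := by ring
  simp [h1, h2, List.filter]
  constructor <;> constructor <;> omega

theorem pvRun_succ_base (r : List (List String)) (m : Nat) (rest : List (Int × Int))
    (memo : PySem.Dict (Int × Int) Int) (h : memo.contains ((0:Int), (0:Int)) = false) :
    pvRun r (m + 1) (((0:Int), (0:Int)) :: rest) memo
      = pvRun r m rest (memo.insert ((0:Int), (0:Int)) 0) := by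
  simp [pvRun, h]

theorem pvRun_succ_push (r : List (List String)) (m : Nat) (i j : Int) (rest : List (Int × Int))
    (memo : PySem.Dict (Int × Int) Int) (todo : List (Int × Int))
    (h1 : memo.contains (i, j) = false) (h2 : ¬(i = 0 ∧ j = 0))
    (h3 : (([(i - 1, j), (i, j - 1)].filter (fun d => decide (0 ≤ d.1 ∧ 0 ≤ d.2))).filter
            (fun d => !(memo.contains d))) = todo)
    (h4 : todo ≠ []) :
    pvRun r (m + 1) ((i, j) :: rest) memo = pvRun r m (todo.reverse ++ (i, j) :: rest) memo := by
  simp only [pvRun, h3]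
  rw [if_neg (by simp [h1]), if_neg h2, if_pos h4]

theorem pvRun_succ_compute (r : List (List String)) (m : Nat) (i j : Int) (rest : List (Int × Int))
    (memo : PySem.Dict (Int × Int) Int) (deps : List (Int × Int))
    (h1 : memo.contains (i, j) = false) (h2 : ¬(i = 0 ∧ j = 0))
    (hdeps : ([(i - 1, j), (i, j - 1)].filter (fun d => decide (0 ≤ d.1 ∧ 0 ≤ d.2))) = deps)
    (h3 : deps.filter (fun d => !(memo.contains d)) = []) :
    pvRun r (m + 1) ((i, j) :: rest) memo
      = pvRun r m rest (memo.insert (i, j)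
          (((deps.map (fun d => memo.getD d 0)).min?).getD 0
            + (if pvGetStr r i j ≠ "." then 1 else 0))) := by
  simp only [pvRun, hdeps, h3]
  rw [if_neg (by simp [h1]), if_neg h2, if_neg (by simp)]

def pvOK (r : List (List String)) (memo : PySem.Dict (Int × Int) Int) : Prop :=
  ∀ (p : Int × Int) (v : Int), memo.get? p = some v →
    ∃ (x y : Nat), p = ((x : Int), (y : Int)) ∧ v = pvg r x y

theorem pvOK_empty (r : List (List String)) : pvOK r PySem.Dict.empty := by
  intro p v h
  simp [PySem.Dict.get?_empty] at h

theorem pvOK_insert (r : List (List String)) (memo : PySem.Dict (Int × Int) Int)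
    (h : pvOK r memo) (x y : Nat) :
    pvOK r (memo.insert ((x : Int), (y : Int)) (pvg r x y)) := by
  intro p v hv
  rw [PySem.Dict.get?_insert] at hv
  by_cases hp : p = ((x : Int), (y : Int))
  · rw [if_pos hp] at hv
    exact ⟨x, y, hp, by simpa using hv.symm⟩
  · rw [if_neg hp] at hv
    exact h p v hv

theorem pvOK_get (r : List (List String)) (memo : PySem.Dict (Int × Int) Int)
    (h : pvOK r memo) (x y : Nat) (v : Int)
    (hs : memo.get? ((x : Int), (y : Int)) = some v) : v = pvg r x y := by
  obtain ⟨x', y', hp, hv⟩ := h _ _ hs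
  obtain ⟨hx, hy⟩ := Prod.mk.injEq .. ▸ hp
  have hx' : x' = x := by exact_mod_cast hx.symm
  have hy' : y' = y := by exact_mod_cast hy.symm
  rw [hv, hx', hy']

theorem contains_isSome (memo : PySem.Dict (Int × Int) Int) (p : Int × Int) :
    memo.contains p = (memo.get? p).isSome := PySem.Dict.contains_eq_isSome_get? _ _

theorem deps_col (x : Nat) :
    ([(((x:Int)+1) - 1, (0:Int)), (((x:Int)+1), (0:Int) - 1)].filter
      (fun d => decide (0 ≤ d.1 ∧ 0 ≤ d.2))) = [((x:Int), (0:Int))] := by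
  have h1 : ((x:Int)+1) - 1 = (x:Int) := by ring
  simp [h1, List.filter]

theorem deps_row (y : Nat) :
    ([((0:Int) - 1, ((y:Int)+1)), ((0:Int), ((y:Int)+1) - 1)].filter
      (fun d => decide (0 ≤ d.1 ∧ 0 ≤ d.2))) = [((0:Int), (y:Int))] := by
  have h2 : ((y:Int)+1) - 1 = (y:Int) := by ring
  simp [h2, List.filter]

theorem mono_insert (memo : PySem.Dict (Int × Int) Int) (k : Int × Int) (v : Int) :
    ∀ p, ((memo.get? p).isSome = true) → (((memo.insert k v).get? p).isSome = true) := by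
  intro p hp
  rw [PySem.Dict.get?_insert]
  by_cases h : p = k <;> simp [h, hp]

-- one more step from a state whose top cell has all its predecessors cached: interior cell
theorem pvFinish_int (r : List (List String)) (x y : Nat) (memo : PySem.Dict (Int × Int) Int)
    (rest : List (Int × Int)) (hOK : pvOK r memo)
    (hu : ((memo.get? ((x:Int), ((y:Int)+1))).isSome = true))
    (hl : ((memo.get? (((x:Int)+1), (y:Int))).isSome = true)) :
    ∃ memo', pvOK r memo' ∧ memo'.get? (((x:Int)+1), ((y:Int)+1)) = some (pvg r (x+1) (y+1))
      ∧ (∀ p, ((memo.get? p).isSome = true) → ((memo'.get? p).isSome = true))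
      ∧ ∀ m, pvRun r (m + 1) (((((x:Int)+1), ((y:Int)+1))) :: rest) memo = pvRun r m rest memo' := by
  have hcx : ((x+1 : Nat) : Int) = (x:Int)+1 := by push_cast; ring
  have hcy : ((y+1 : Nat) : Int) = (y:Int)+1 := by push_cast; ring
  obtain ⟨vu, hvu⟩ := Option.isSome_iff_exists.mp hu
  obtain ⟨vl, hvl⟩ := Option.isSome_iff_exists.mp hl
  have hvu' : vu = pvg r x (y+1) := pvOK_get r memo hOK x (y+1) vu (by rw [hcy]; exact hvu)
  have hvl' : vl = pvg r (x+1) y := pvOK_get r memo hOK (x+1) y vl (by rw [hcx]; exact hvl)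
  cases hc : memo.contains (((x:Int)+1), ((y:Int)+1)) with
  | true =>
      rw [contains_isSome] at hc
      obtain ⟨v, hv⟩ := Option.isSome_iff_exists.mp hc
      have hv' : v = pvg r (x+1) (y+1) :=
        pvOK_get r memo hOK (x+1) (y+1) v (by rw [hcx, hcy]; exact hv)
      exact ⟨memo, hOK, by rw [← hv', hv], fun p hp => hp,
        fun m => pvRun_succ_mem r m _ _ rest memo (by rw [contains_isSome, hv]; rfl)⟩
  | false =>
      have hval : (((([((x:Int), ((y:Int)+1)), (((x:Int)+1), (y:Int))]).map
            (fun d => memo.getD d 0)).min?).getD 0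
          + (if pvGetStr r ((x:Int)+1) ((y:Int)+1) ≠ "." then 1 else 0)) = pvg r (x+1) (y+1) := by
        simp only [List.map]
        rw [PySem.Dict.getD_eq_get?_getD, PySem.Dict.getD_eq_get?_getD, hvu, hvl]
        simp only [Option.getD_some]
        rw [min2, if_ne_eq_pcost, hvu', hvl']
        rw [show pvg r (x+1) (y+1)
              = min (pvg r x (y+1)) (pvg r (x+1) y) + pvC r (x+1) (y+1) from by simp [pvg]]
        simp [pvC, hcx, hcy]
      refine ⟨memo.insert (((x:Int)+1), ((y:Int)+1)) (pvg r (x+1) (y+1)),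
        by have := pvOK_insert r memo hOK (x+1) (y+1); rwa [hcx, hcy] at this,
        by rw [PySem.Dict.get?_insert, if_pos rfl],
        mono_insert _ _ _, fun m => ?_⟩
      rw [pvRun_succ_compute r m _ _ rest memo [((x:Int), ((y:Int)+1)), (((x:Int)+1), (y:Int))]
        hc (by push_cast; omega) (deps_interior x y)
        (by
          rw [List.filter_eq_nil_iff]
          intro d hd
          simp only [List.mem_cons, List.not_mem_nil, or_false] at hd
          rcases hd with h | h <;> subst h <;>
            simp [contains_isSome, hvu, hvl])]
      rw [hval]

theorem pvFinish_col (r : List (List String)) (x : Nat) (memo : PySem.Dict (Int × Int) Int)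
    (rest : List (Int × Int)) (hOK : pvOK r memo)
    (hd : ((memo.get? ((x:Int), (0:Int))).isSome = true)) :
    ∃ memo', pvOK r memo' ∧ memo'.get? (((x:Int)+1), (0:Int)) = some (pvg r (x+1) 0)
      ∧ (∀ p, ((memo.get? p).isSome = true) → ((memo'.get? p).isSome = true))
      ∧ ∀ m, pvRun r (m + 1) (((((x:Int)+1), (0:Int))) :: rest) memo = pvRun r m rest memo' := by
  have hcx : ((x+1 : Nat) : Int) = (x:Int)+1 := by push_cast; ring
  obtain ⟨vd, hvd⟩ := Option.isSome_iff_exists.mp hd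
  have hvd' : vd = pvg r x 0 := pvOK_get r memo hOK x 0 vd hvd
  cases hc : memo.contains (((x:Int)+1), (0:Int)) with
  | true =>
      rw [contains_isSome] at hc
      obtain ⟨v, hv⟩ := Option.isSome_iff_exists.mp hc
      have hv' : v = pvg r (x+1) 0 :=
        pvOK_get r memo hOK (x+1) 0 v (by rw [hcx]; exact hv)
      exact ⟨memo, hOK, by rw [← hv', hv], fun p hp => hp,
        fun m => pvRun_succ_mem r m _ _ rest memo (by rw [contains_isSome, hv]; rfl)⟩
  | false =>
      have hval : ((([((x:Int), (0:Int))]).map (fun d => memo.getD d 0)).min?.getD 0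
          + (if pvGetStr r ((x:Int)+1) (0:Int) ≠ "." then 1 else 0)) = pvg r (x+1) 0 := by
        simp only [List.map]
        rw [PySem.Dict.getD_eq_get?_getD, hvd]
        simp only [Option.getD_some]
        rw [min1, if_ne_eq_pcost, hvd']
        rw [show pvg r (x+1) 0 = pvg r x 0 + pvC r (x+1) 0 from by simp [pvg]]
        simp [pvC, hcx]
      refine ⟨memo.insert (((x:Int)+1), (0:Int)) (pvg r (x+1) 0),
        by have := pvOK_insert r memo hOK (x+1) 0; rwa [hcx] at this,
        by rw [PySem.Dict.get?_insert, if_pos rfl],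
        mono_insert _ _ _, fun m => ?_⟩
      rw [pvRun_succ_compute r m _ _ rest memo [((x:Int), (0:Int))]
        hc (by push_cast; omega) (deps_col x)
        (by
          rw [List.filter_eq_nil_iff]
          intro d hd'
          simp only [List.mem_cons, List.not_mem_nil, or_false] at hd'
          subst hd'
          simp [contains_isSome, hvd])]
      rw [hval]

theorem pvFinish_row (r : List (List String)) (y : Nat) (memo : PySem.Dict (Int × Int) Int)
    (rest : List (Int × Int)) (hOK : pvOK r memo)
    (hd : ((memo.get? ((0:Int), (y:Int))).isSome = true)) :
    ∃ memo', pvOK r memo' ∧ memo'.get? ((0:Int), ((y:Int)+1)) = some (pvg r 0 (y+1))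
      ∧ (∀ p, ((memo.get? p).isSome = true) → ((memo'.get? p).isSome = true))
      ∧ ∀ m, pvRun r (m + 1) ((((0:Int), ((y:Int)+1))) :: rest) memo = pvRun r m rest memo' := by
  have hcy : ((y+1 : Nat) : Int) = (y:Int)+1 := by push_cast; ring
  obtain ⟨vd, hvd⟩ := Option.isSome_iff_exists.mp hd
  have hvd' : vd = pvg r 0 y := pvOK_get r memo hOK 0 y vd hvd
  cases hc : memo.contains ((0:Int), ((y:Int)+1)) with
  | true =>
      rw [contains_isSome] at hc
      obtain ⟨v, hv⟩ := Option.isSome_iff_exists.mp hc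
      have hv' : v = pvg r 0 (y+1) :=
        pvOK_get r memo hOK 0 (y+1) v (by rw [hcy]; exact hv)
      exact ⟨memo, hOK, by rw [← hv', hv], fun p hp => hp,
        fun m => pvRun_succ_mem r m _ _ rest memo (by rw [contains_isSome, hv]; rfl)⟩
  | false =>
      have hval : ((([((0:Int), (y:Int))]).map (fun d => memo.getD d 0)).min?.getD 0
          + (if pvGetStr r (0:Int) ((y:Int)+1) ≠ "." then 1 else 0)) = pvg r 0 (y+1) := by
        simp only [List.map]
        rw [PySem.Dict.getD_eq_get?_getD, hvd]
        simp only [Option.getD_some]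
        rw [min1, if_ne_eq_pcost, hvd']
        rw [show pvg r 0 (y+1) = pvg r 0 y + pvC r 0 (y+1) from by simp [pvg]]
        simp [pvC, hcy]
      refine ⟨memo.insert ((0:Int), ((y:Int)+1)) (pvg r 0 (y+1)),
        by have := pvOK_insert r memo hOK 0 (y+1); rwa [hcy] at this,
        by rw [PySem.Dict.get?_insert, if_pos rfl],
        mono_insert _ _ _, fun m => ?_⟩
      rw [pvRun_succ_compute r m _ _ rest memo [((0:Int), (y:Int))]
        hc (by push_cast; omega) (deps_row y)
        (by
          rw [List.filter_eq_nil_iff]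
          intro d hd'
          simp only [List.mem_cons, List.not_mem_nil, or_false] at hd'
          subst hd'
          simp [contains_isSome, hvd])]
      rw [hval]

-- one step when the top cell is already cached
theorem pvStep_mem (r : List (List String)) (x y : Nat) (memo : PySem.Dict (Int × Int) Int)
    (rest : List (Int × Int)) (hOK : pvOK r memo)
    (hmem : memo.contains ((x:Int), (y:Int)) = true) :
    ∃ (memo' : PySem.Dict (Int × Int) Int), pvOK r memo' ∧
      memo'.get? ((x:Int), (y:Int)) = some (pvg r x y) ∧
      (∀ p, ((memo.get? p).isSome = true) → ((memo'.get? p).isSome = true)) ∧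
      (∀ m, pvRun r (m + 1) (((x:Int), (y:Int)) :: rest) memo = pvRun r m rest memo') := by
  have hs := hmem
  rw [contains_isSome] at hs
  obtain ⟨v, hv⟩ := Option.isSome_iff_exists.mp hs
  have hv' : v = pvg r x y := pvOK_get r memo hOK x y v hv
  exact ⟨memo, hOK, by rw [← hv', hv], fun p hp => hp,
    fun m => pvRun_succ_mem r m _ _ rest memo hmem⟩

-- one step at the start cell when it is not cached yet
theorem pvStep_base (r : List (List String)) (memo : PySem.Dict (Int × Int) Int)
    (rest : List (Int × Int)) (hOK : pvOK r memo)
    (hmem : memo.contains ((0:Int), (0:Int)) = false) :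
    ∃ (memo' : PySem.Dict (Int × Int) Int), pvOK r memo' ∧
      memo'.get? ((0:Int), (0:Int)) = some (pvg r 0 0) ∧
      (∀ p, ((memo.get? p).isSome = true) → ((memo'.get? p).isSome = true)) ∧
      (∀ m, pvRun r (m + 1) (((0:Int), (0:Int)) :: rest) memo = pvRun r m rest memo') := by
  have h0 : pvg r 0 0 = 0 := by simp [pvg]
  refine ⟨memo.insert ((0:Int), (0:Int)) 0, ?_, ?_, mono_insert _ _ _,
    fun m => pvRun_succ_base r m rest memo hmem⟩
  · have := pvOK_insert r memo hOK 0 0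
    rw [h0] at this
    simpa using this
  · rw [PySem.Dict.get?_insert, if_pos rfl, h0]

theorem pvRunLem (r : List (List String)) :
    ∀ (s : Nat), ∀ (x y : Nat), x + y ≤ s →
    ∀ (memo : PySem.Dict (Int × Int) Int) (rest : List (Int × Int)), pvOK r memo →
      ∃ (k : Nat) (memo' : PySem.Dict (Int × Int) Int),
        k ≤ 3 ^ (s + 1) ∧ pvOK r memo' ∧
        memo'.get? ((x : Int), (y : Int)) = some (pvg r x y) ∧
        (∀ p, ((memo.get? p).isSome = true) → ((memo'.get? p).isSome = true)) ∧
        (∀ m, pvRun r (k + m) (((x:Int), (y:Int)) :: rest) memo = pvRun r m rest memo') := by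
  intro s
  induction s with
  | zero =>
      intro x y hxy memo rest hOK
      have hx : x = 0 := by omega
      have hy : y = 0 := by omega
      subst hx; subst hy
      cases hmem : memo.contains (((0:Nat):Int), ((0:Nat):Int)) with
      | true =>
          obtain ⟨memo', hOK', hget', hmono', hrun'⟩ := pvStep_mem r 0 0 memo rest hOK hmem
          exact ⟨1, memo', by norm_num, hOK', hget', hmono',
            fun m => by rw [Nat.add_comm 1 m]; exact hrun' m⟩
      | false =>
          simp only [Nat.cast_zero] at hmem ⊢
          obtain ⟨memo', hOK', hget', hmono', hrun'⟩ := pvStep_base r memo rest hOK hmem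
          exact ⟨1, memo', by norm_num, hOK', hget', hmono',
            fun m => by rw [Nat.add_comm 1 m]; exact hrun' m⟩
  | succ s ih =>
      intro x y hxy memo rest hOK
      cases hmem : memo.contains (((x:Nat):Int), ((y:Nat):Int)) with
      | true =>
          obtain ⟨memo', hOK', hget', hmono', hrun'⟩ := pvStep_mem r x y memo rest hOK hmem
          exact ⟨1, memo', Nat.one_le_two_pow.trans (by
              exact Nat.pow_le_pow_left (by norm_num) _) |>.trans (le_refl _) |>.trans (le_refl _),
            hOK', hget', hmono',
            fun m => by rw [Nat.add_comm 1 m]; exact hrun' m⟩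
      | false =>
          match x, y with
          | 0, 0 =>
              simp only [Nat.cast_zero] at hmem ⊢
              obtain ⟨memo', hOK', hget', hmono', hrun'⟩ := pvStep_base r memo rest hOK hmem
              exact ⟨1, memo', Nat.one_le_pow _ _ (by norm_num), hOK', hget', hmono',
                fun m => by rw [Nat.add_comm 1 m]; exact hrun' m⟩
          | x+1, 0 =>
              have hcx : ((x+1 : Nat) : Int) = (x:Int)+1 := by push_cast; ring
              rw [hcx, Nat.cast_zero] at hmem ⊢
              cases hdep : memo.contains ((x:Int), (0:Int)) with
              | true =>
                  obtain ⟨memo', hOK', hget', hmono', hrun'⟩ :=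
                    pvFinish_col r x memo rest hOK (by rwa [contains_isSome] at hdep)
                  exact ⟨1, memo', Nat.one_le_pow _ _ (by norm_num), hOK', hget', hmono',
                    fun m => by rw [Nat.add_comm 1 m]; exact hrun' m⟩
              | false =>
                  obtain ⟨k1, memo1, hk1, hOK1, hget1, hmono1, hrun1⟩ :=
                    ih x 0 (by omega) memo ((((x:Int)+1), (0:Int)) :: rest) hOK
                  simp only [Nat.cast_zero] at hget1 hrun1
                  obtain ⟨memo2, hOK2, hget2, hmono2, hrun2⟩ :=
                    pvFinish_col r x memo1 rest hOK1 (by rw [hget1]; rfl)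
                  refine ⟨k1 + 2, memo2, by
                      have h3 : (3:Nat)^(s+1) + 2 ≤ 3^(s+1+1) := by
                        have : (1:Nat) ≤ 3^(s+1) := Nat.one_le_pow _ _ (by norm_num)
                        calc (3:Nat)^(s+1) + 2 ≤ 3^(s+1) + 2 * 3^(s+1) := by omega
                        _ = 3 * 3^(s+1) := by ring
                        _ = 3^(s+1+1) := by ring
                      omega,
                    hOK2, hget2, fun p hp => hmono2 p (hmono1 p hp), fun m => ?_⟩
                  have e1 : k1 + 2 + m = (k1 + 1 + m) + 1 := by omega
                  rw [e1, pvRun_succ_push r (k1+1+m) _ _ rest memo [((x:Int), (0:Int))]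
                    hmem (by omega) (by rw [deps_col x]; simp [List.filter, hdep]) (by simp)]
                  simp only [List.reverse_singleton, List.singleton_append]
                  have e2 : k1 + 1 + m = k1 + (1 + m) := by omega
                  rw [e2, hrun1 (1+m), Nat.add_comm 1 m, hrun2 m]
          | 0, y+1 =>
              have hcy : ((y+1 : Nat) : Int) = (y:Int)+1 := by push_cast; ring
              rw [hcy, Nat.cast_zero] at hmem ⊢
              cases hdep : memo.contains ((0:Int), (y:Int)) with
              | true =>
                  obtain ⟨memo', hOK', hget', hmono', hrun'⟩ :=
                    pvFinish_row r y memo rest hOK (by rwa [contains_isSome] at hdep)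
                  exact ⟨1, memo', Nat.one_le_pow _ _ (by norm_num), hOK', hget', hmono',
                    fun m => by rw [Nat.add_comm 1 m]; exact hrun' m⟩
              | false =>
                  obtain ⟨k1, memo1, hk1, hOK1, hget1, hmono1, hrun1⟩ :=
                    ih 0 y (by omega) memo (((0:Int), ((y:Int)+1)) :: rest) hOK
                  simp only [Nat.cast_zero] at hget1 hrun1
                  obtain ⟨memo2, hOK2, hget2, hmono2, hrun2⟩ :=
                    pvFinish_row r y memo1 rest hOK1 (by rw [hget1]; rfl)
                  refine ⟨k1 + 2, memo2, by
                      have : (1:Nat) ≤ 3^(s+1) := Nat.one_le_pow _ _ (by norm_num)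
                      have h3 : (3:Nat)^(s+1+1) = 3 * 3^(s+1) := by ring
                      omega,
                    hOK2, hget2, fun p hp => hmono2 p (hmono1 p hp), fun m => ?_⟩
                  have e1 : k1 + 2 + m = (k1 + 1 + m) + 1 := by omega
                  rw [e1, pvRun_succ_push r (k1+1+m) _ _ rest memo [((0:Int), (y:Int))]
                    hmem (by omega) (by rw [deps_row y]; simp [List.filter, hdep]) (by simp)]
                  simp only [List.reverse_singleton, List.singleton_append]
                  have e2 : k1 + 1 + m = k1 + (1 + m) := by omega
                  rw [e2, hrun1 (1+m), Nat.add_comm 1 m, hrun2 m]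
          | x+1, y+1 =>
              have hcx : ((x+1 : Nat) : Int) = (x:Int)+1 := by push_cast; ring
              have hcy : ((y+1 : Nat) : Int) = (y:Int)+1 := by push_cast; ring
              rw [hcx, hcy] at hmem ⊢
              have hone : (1:Nat) ≤ 3^(s+1) := Nat.one_le_pow _ _ (by norm_num)
              have h3 : (3:Nat)^(s+1+1) = 3 * 3^(s+1) := by ring
              cases hu : memo.contains ((x:Int), ((y:Int)+1)) with
              | true =>
                cases hl : memo.contains (((x:Int)+1), (y:Int)) with
                | true =>
                    obtain ⟨memo', hOK', hget', hmono', hrun'⟩ :=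
                      pvFinish_int r x y memo rest hOK (by rwa [contains_isSome] at hu)
                        (by rwa [contains_isSome] at hl)
                    exact ⟨1, memo', Nat.one_le_pow _ _ (by norm_num), hOK', hget', hmono',
                      fun m => by rw [Nat.add_comm 1 m]; exact hrun' m⟩
                | false =>
                    -- only the left neighbour is missing
                    obtain ⟨k1, memo1, hk1, hOK1, hget1, hmono1, hrun1⟩ :=
                      ih (x+1) y (by omega) memo ((((x:Int)+1), ((y:Int)+1)) :: rest) hOK
                    rw [hcx] at hget1 hrun1
                    obtain ⟨memo2, hOK2, hget2, hmono2, hrun2⟩ :=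
                      pvFinish_int r x y memo1 rest hOK1
                        (hmono1 _ (by rwa [contains_isSome] at hu)) (by rw [hget1]; rfl)
                    refine ⟨k1 + 2, memo2, by omega,
                      hOK2, hget2, fun p hp => hmono2 p (hmono1 p hp), fun m => ?_⟩
                    have e1 : k1 + 2 + m = (k1 + 1 + m) + 1 := by omega
                    rw [e1, pvRun_succ_push r (k1+1+m) _ _ rest memo [(((x:Int)+1), (y:Int))]
                      hmem (by omega) (by rw [deps_interior x y]; simp [List.filter, hu, hl])
                      (by simp)]
                    simp only [List.reverse_singleton, List.singleton_append]
                    have e2 : k1 + 1 + m = k1 + (1 + m) := by omega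
                    rw [e2, hrun1 (1+m), Nat.add_comm 1 m, hrun2 m]
              | false =>
                cases hl : memo.contains (((x:Int)+1), (y:Int)) with
                | true =>
                    -- only the upper neighbour is missing
                    obtain ⟨k1, memo1, hk1, hOK1, hget1, hmono1, hrun1⟩ :=
                      ih x (y+1) (by omega) memo ((((x:Int)+1), ((y:Int)+1)) :: rest) hOK
                    rw [hcy] at hget1 hrun1
                    obtain ⟨memo2, hOK2, hget2, hmono2, hrun2⟩ :=
                      pvFinish_int r x y memo1 rest hOK1
                        (by rw [hget1]; rfl) (hmono1 _ (by rwa [contains_isSome] at hl))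
                    refine ⟨k1 + 2, memo2, by omega,
                      hOK2, hget2, fun p hp => hmono2 p (hmono1 p hp), fun m => ?_⟩
                    have e1 : k1 + 2 + m = (k1 + 1 + m) + 1 := by omega
                    rw [e1, pvRun_succ_push r (k1+1+m) _ _ rest memo [((x:Int), ((y:Int)+1))]
                      hmem (by omega) (by rw [deps_interior x y]; simp [List.filter, hu, hl])
                      (by simp)]
                    simp only [List.reverse_singleton, List.singleton_append]
                    have e2 : k1 + 1 + m = k1 + (1 + m) := by omega
                    rw [e2, hrun1 (1+m), Nat.add_comm 1 m, hrun2 m]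
                | false =>
                    -- both neighbours missing: the stack gets [left, upper] on top
                    obtain ⟨k1, memo1, hk1, hOK1, hget1, hmono1, hrun1⟩ :=
                      ih (x+1) y (by omega) memo
                        (((x:Int), ((y:Int)+1)) :: (((x:Int)+1), ((y:Int)+1)) :: rest) hOK
                    rw [hcx] at hget1 hrun1
                    obtain ⟨k2, memo2, hk2, hOK2, hget2, hmono2, hrun2⟩ :=
                      ih x (y+1) (by omega) memo1 ((((x:Int)+1), ((y:Int)+1)) :: rest) hOK1
                    rw [hcy] at hget2 hrun2
                    obtain ⟨memo3, hOK3, hget3, hmono3, hrun3⟩ :=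
                      pvFinish_int r x y memo2 rest hOK2
                        (by rw [hget2]; rfl) (hmono2 _ (by rw [hget1]; rfl))
                    refine ⟨k1 + k2 + 2, memo3, by omega,
                      hOK3, hget3, fun p hp => hmono3 p (hmono2 p (hmono1 p hp)), fun m => ?_⟩
                    have e1 : k1 + k2 + 2 + m = (k1 + k2 + 1 + m) + 1 := by omega
                    rw [e1, pvRun_succ_push r (k1+k2+1+m) _ _ rest memo
                      [((x:Int), ((y:Int)+1)), (((x:Int)+1), (y:Int))]
                      hmem (by omega) (by rw [deps_interior x y]; simp [List.filter, hu, hl])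
                      (by simp)]
                    have e3 : ([((x:Int), ((y:Int)+1)), (((x:Int)+1), (y:Int))].reverse
                        ++ (((x:Int)+1), ((y:Int)+1)) :: rest)
                      = (((x:Int)+1), (y:Int)) :: ((x:Int), ((y:Int)+1))
                          :: (((x:Int)+1), ((y:Int)+1)) :: rest := by simp
                    rw [e3]
                    have e2 : k1 + k2 + 1 + m = k1 + (k2 + (1 + m)) := by omega
                    rw [e2, hrun1 (k2 + (1+m)), hrun2 (1+m), Nat.add_comm 1 m, hrun3 m]


-- ===== bridges: rolling rows = pvg, and count_alt = pvg =====

theorem firstCosts_g (r0 : List String) (rs : List (List String)) :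
    ∀ (t k : Nat), k + 1 + t = r0.length →
      pvFirstCosts (r0.drop (k+1)) (pvg (r0::rs) 0 k)
        = (List.range' (k+1) t).map (pvg (r0::rs) 0) := by
  intro t
  induction t with
  | zero =>
      intro k hk
      rw [List.drop_eq_nil_of_le (by omega)]
      rfl
  | succ t ih =>
      intro k hk
      have hlt : k + 1 < r0.length := by omega
      rw [List.drop_eq_getElem_cons hlt]
      have hstr : r0[k+1] = pvGetStr (r0::rs) (0 : Int) (((k+1 : Nat)) : Int) := by
        simp only [pvGetStr, PySem.List.pyGet?_zero_cons, Option.getD_some,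
          PySem.List.pyGet?_natCast, List.getElem?_eq_getElem hlt]
      have hnext : (if r0[k+1] ≠ "." then pvg (r0::rs) 0 k + 1 else pvg (r0::rs) 0 k)
          = pvg (r0::rs) 0 (k+1) := by
        rw [if_ne_eq_add_pcost]
        rw [show pvg (r0::rs) 0 (k+1) = pvg (r0::rs) 0 k + pvC (r0::rs) 0 (k+1) from by
          simp [pvg]]
        rw [hstr]
        rfl
      simp only [pvFirstCosts, hnext]
      rw [ih (k+1) (by omega)]
      rw [show List.range' (k+1) (t+1) = (k+1) :: List.range' (k+2) t from rfl]
      rfl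

theorem rowCells_g (r : List (List String)) (x : Nat) (row : List String) (prev : List Int)
    (w : Nat) (hget : PySem.List.pyGet? r ((x:Int)+1) = some row)
    (hw : 1 ≤ w) (hrow : w ≤ row.length)
    (hprev : prev = (List.range' 0 w).map (pvg r x)) :
    pvRowCells (row.zip prev) none = (List.range' 0 w).map (pvg r (x+1)) := by
  have hplen : prev.length = w := by simp [hprev]
  have hzlen : (row.zip prev).length = w := by
    rw [List.length_zip, hplen]; omega
  have hpel : ∀ (i : Nat) (hi : i < w), prev[i]'(by omega) = pvg r x i := by
    intro i hi
    subst hprev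
    simp [List.getElem_range' ]
  have hstr : ∀ (j : Nat) (hj : j < w), pvGetStr r ((x:Int)+1) ((j:Nat):Int)
      = row[j]'(by omega) := by
    intro j hj
    simp only [pvGetStr, hget, Option.getD_some, PySem.List.pyGet?_natCast,
      List.getElem?_eq_getElem (by omega : j < row.length)]
  have hCeq : ∀ (j : Nat) (hj : j < w), pvC r (x+1) j = pcost (row[j]'(by omega)) := by
    intro j hj
    rw [pvC, show (((x+1:Nat)):Int) = (x:Int)+1 from by push_cast; ring, hstr j hj]
  have aux : ∀ (t k : Nat), k + 1 + t = w →
      pvRowCells ((row.zip prev).drop (k+1)) (some (pvg r (x+1) k))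
        = (List.range' (k+1) t).map (pvg r (x+1)) := by
    intro t
    induction t with
    | zero =>
        intro k hk
        rw [List.drop_eq_nil_of_le (by omega)]
        rfl
    | succ t ih =>
        intro k hk
        have hklt : k + 1 < (row.zip prev).length := by omega
        rw [List.drop_eq_getElem_cons hklt, List.getElem_zip]
        have hv : (min (prev[k+1]'(by omega)) (pvg r (x+1) k)
              + if (row[k+1]'(by omega)) ≠ "." then (1:Int) else 0) = pvg r (x+1) (k+1) := by
          rw [if_ne_eq_pcost, hpel (k+1) (by omega), ← hCeq (k+1) (by omega)]
          rw [show pvg r (x+1) (k+1)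
                = min (pvg r x (k+1)) (pvg r (x+1) k) + pvC r (x+1) (k+1) from by simp [pvg]]
        simp only [pvRowCells, hv]
        rw [ih (k+1) (by omega)]
        rfl
  have h0 : 0 < (row.zip prev).length := by omega
  have hz0 := List.drop_eq_getElem_cons h0
  rw [List.drop_zero] at hz0
  rw [hz0, List.getElem_zip]
  have hv0 : ((prev[0]'(by omega))
        + if (row[0]'(by omega)) ≠ "." then (1:Int) else 0) = pvg r (x+1) 0 := by
    rw [if_ne_eq_pcost, hpel 0 (by omega), ← hCeq 0 (by omega)]
    rw [show pvg r (x+1) 0 = pvg r x 0 + pvC r (x+1) 0 from by simp [pvg]]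
  simp only [pvRowCells, hv0]
  rw [aux (w-1) 0 (by omega)]
  rw [show w = (w-1)+1 from by omega]
  rfl

theorem fold_rows_g (r : List (List String)) (w : Nat) (hw : 1 ≤ w) :
    ∀ (ss : List (List String)) (x : Nat),
      r.drop (x+1) = ss → (∀ row ∈ ss, w ≤ row.length) →
      ss.foldl (fun cur row => pvRowCells (row.zip cur) none) ((List.range' 0 w).map (pvg r x))
        = (List.range' 0 w).map (pvg r (x + ss.length)) := by
  intro ss
  induction ss with
  | nil =>
      intro x _ _
      simp
  | cons row rest ih =>
      intro x hd hlens
      have hget : PySem.List.pyGet? r ((x:Int)+1) = some row := by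
        rw [show ((x:Int)+1) = ((x+1:Nat):Int) from by push_cast; ring,
          PySem.List.pyGet?_natCast, ← List.head?_drop, hd]
        rfl
      simp only [List.foldl_cons]
      rw [rowCells_g r x row _ w hget hw (hlens row (by simp)) rfl]
      have hd2 : r.drop (x+1+1) = rest := by
        have h := congrArg List.tail hd
        rw [List.tail_drop] at h
        exact h
      rw [ih (x+1) hd2 (fun rr hm => hlens rr (by simp [hm]))]
      rw [show x + 1 + rest.length = x + (row :: rest).length from by simp; omega]

theorem roll_eq_g (r : List (List String)) (hpre : Pre_count r) :
    pvRoll r = pvg r (r.length - 1) ((r.headD []).length - 1) := by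
  obtain ⟨hne, hne0, hlen⟩ := hpre
  cases r with
  | nil => exact absurd rfl hne
  | cons r0 rs =>
  simp only [List.headD] at hne0 hlen ⊢
  have hw : 1 ≤ r0.length := List.length_pos_iff.mpr hne0
  have h00 : (0:Int) = pvg (r0::rs) 0 0 := by simp [pvg]
  have hcur : ((0:Int) :: pvFirstCosts (r0.drop 1) 0)
      = (List.range' 0 r0.length).map (pvg (r0::rs) 0) := by
    conv_lhs => rw [h00]
    rw [firstCosts_g r0 rs (r0.length - 1) 0 (by omega)]
    rw [show r0.length = (r0.length - 1) + 1 from by omega]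
    rfl
  have hfin := fold_rows_g (r0::rs) r0.length hw rs 0 (by simp)
    (fun row hm => hlen row (by simp [hm]))
  simp only [pvRoll, List.headD, List.drop_one, List.tail_cons]
  rw [List.drop_one] at hcur
  rw [hcur, hfin]
  rw [show List.range' 0 r0.length = List.range' 0 (r0.length - 1) ++ [r0.length - 1] from by
    rw [show r0.length = (r0.length - 1) + 1 from by omega, List.range'_concat]
    simp]
  rw [List.map_append, List.map_singleton, PySem.List.pyGet?_neg_one_append_singleton]
  simp

theorem alt_eq_g (r : List (List String)) (hpre : Pre_count r) :
    count_alt r = pvg r (r.length - 1) ((r.headD []).length - 1) := by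
  obtain ⟨hne, hne0, -⟩ := hpre
  have hL : 1 ≤ r.length := List.length_pos_iff.mpr hne
  have hW : 1 ≤ (r.headD []).length := List.length_pos_iff.mpr hne0
  have hc1 : ((r.length : Int) - 1) = ((r.length - 1 : Nat) : Int) := by omega
  have hc2 : (((r.headD []).length : Int) - 1) = (((r.headD []).length - 1 : Nat) : Int) := by
    omega
  obtain ⟨k, memo', hk, hOK', hget', hmono', hrun'⟩ :=
    pvRunLem r ((r.length - 1) + ((r.headD []).length - 1)) (r.length - 1)
      ((r.headD []).length - 1) le_rfl PySem.Dict.empty [] (pvOK_empty r)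
  have hfuel : k ≤ 3 ^ (r.length + (r.headD []).length) :=
    hk.trans (Nat.pow_le_pow_right (by norm_num) (by omega))
  unfold count_alt
  simp only [hc1, hc2]
  rw [show (3 : Nat) ^ (r.length + (r.headD []).length)
        = k + (3 ^ (r.length + (r.headD []).length) - k) from by omega]
  rw [hrun' _, pvRun_nil, hget']
  rfl

-- ===== VERDICT (by name: the statement is the Claim_ definition above) =====
theorem count_spec : Claim_equal_count := by
  intro r _hdom hpre
  unfold Spec_count
  rw [count_eq_roll r hpre, roll_eq_g r hpre, alt_eq_g r hpre]
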